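-- pv_equiv track=rewrite | github.com/HuskyCommunicator/qny | qny-python/app/services/growth_service_optimized.py | _calculate_skill_proficiency_upgrade
-- ===== SOURCE A (Python) =====
-- def _calculate_skill_proficiency_upgrade(usage_count: int, current_level: int) -> int:
--     """计算技能熟练度升级"""
--     # 简化的熟练度升级公式
--     usage_thresholds = [5, 15, 30, 50, 75, 100, 150, 200, 300, 500]
--
--     for level, threshold in enumerate(usage_thresholds, 1):
--         if usage_count >= threshold:
--             current_level = level
--         else:
--             break
--
--     return min(current_level, 10)  # 最高10级
-- ===== SOURCE B (Python) =====
-- def _calculate_skill_proficiency_upgrade(usage_count: int, current_level: int) -> int: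
--     """Binary search for the highest threshold reached, instead of a linear scan."""
--     usage_thresholds = [5, 15, 30, 50, 75, 100, 150, 200, 300, 500]
--     lo, hi = 0, len(usage_thresholds)
--     while lo < hi:
--         mid = (lo + hi) // 2
--         if usage_count < usage_thresholds[mid]:
--             hi = mid
--         else:
--             lo = mid + 1
--     # lo = number of thresholds met; 0 means no upgrade, keep current_level (capped at 10)
--     return min(lo, 10) if lo else min(current_level, 10)
-- ===== Notes on version B (the rewrite author's own statement) =====
-- stated objective: alternative
-- what changed: Replaces the linear early-break scan over enumerated thresholds by a hand-written binary search (bisect_right) that counts the thresholds met, falling back to current_level when none is met.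
import Mathlib
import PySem

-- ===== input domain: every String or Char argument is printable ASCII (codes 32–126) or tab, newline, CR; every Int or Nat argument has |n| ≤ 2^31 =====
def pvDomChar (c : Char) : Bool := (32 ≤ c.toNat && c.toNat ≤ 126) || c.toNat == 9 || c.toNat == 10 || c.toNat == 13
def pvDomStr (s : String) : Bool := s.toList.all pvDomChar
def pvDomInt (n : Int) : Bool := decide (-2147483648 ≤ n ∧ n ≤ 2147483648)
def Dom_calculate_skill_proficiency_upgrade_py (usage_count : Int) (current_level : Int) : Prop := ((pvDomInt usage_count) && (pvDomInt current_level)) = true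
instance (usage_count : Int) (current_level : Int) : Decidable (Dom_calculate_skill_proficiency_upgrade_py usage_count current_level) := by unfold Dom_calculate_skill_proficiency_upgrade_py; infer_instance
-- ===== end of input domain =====

-- B replaces A's linear early-break threshold scan by a binary search (bisect_right) counting thresholds met (alternative algorithm).


-- ===== PORT A =====
-- A: loop over enumerate(usage_thresholds, 1) with an early break
def pvLoopA (usage_count : Int) : List (Int × Int) → Int → Int
  | [], cl => cl
  | (level, threshold) :: rest, cl =>
    if usage_count ≥ threshold then pvLoopA usage_count rest level else cl

def calculate_skill_proficiency_upgrade_py (usage_count : Int) (current_level : Int) : Int :=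
  min (pvLoopA usage_count (PySem.List.enumerate [5, 15, 30, 50, 75, 100, 150, 200, 300, 500] 1) current_level) 10

-- ===== PORT B =====
-- B: hand-written bisect_right (while lo < hi binary search); list access is always in bounds (mid < hi ≤ length), so getD is exact
def pvBisect (t : List Int) (x : Int) (lo hi : Nat) : Nat :=
  if lo < hi then
    let mid := (lo + hi) / 2
    if x < t.getD mid 0 then pvBisect t x lo mid else pvBisect t x (mid + 1) hi
  else lo
termination_by hi - lo
decreasing_by all_goals omega

def calculate_skill_proficiency_upgrade_py_alt (usage_count : Int) (current_level : Int) : Int :=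
  let lo := pvBisect [5, 15, 30, 50, 75, 100, 150, 200, 300, 500] usage_count 0 10
  if lo ≠ 0 then min (lo : Int) 10 else min current_level 10

-- ===== PRECONDITION & SPEC =====
def Spec_calculate_skill_proficiency_upgrade_py (usage_count : Int) (current_level : Int) (out : Int) : Prop := out = calculate_skill_proficiency_upgrade_py_alt usage_count current_level
instance (usage_count : Int) (current_level : Int) (out : Int) : Decidable (Spec_calculate_skill_proficiency_upgrade_py usage_count current_level out) := by unfold Spec_calculate_skill_proficiency_upgrade_py; infer_instance

-- ===== CLAIM (what is proved, stated in full; the proofs are below) =====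
def Claim_equal_calculate_skill_proficiency_upgrade_py : Prop := ∀ (usage_count : Int) (current_level : Int), Dom_calculate_skill_proficiency_upgrade_py usage_count current_level → Spec_calculate_skill_proficiency_upgrade_py usage_count current_level (calculate_skill_proficiency_upgrade_py usage_count current_level)

-- ===== LEMMAS AND PROOFS =====

-- ===== VERDICT (by name: the statement is the Claim_ definition above) =====
set_option maxRecDepth 40000 in
set_option maxHeartbeats 2000000 in
theorem calculate_skill_proficiency_upgrade_py_spec : Claim_equal_calculate_skill_proficiency_upgrade_py := by
  intro usage_count current_level _hd
  unfold Spec_calculate_skill_proficiency_upgrade_py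
  unfold calculate_skill_proficiency_upgrade_py calculate_skill_proficiency_upgrade_py_alt
  simp only [PySem.List.enumerate_cons, PySem.List.enumerate_nil, pvLoopA]
  unfold pvBisect; norm_num
  unfold pvBisect; norm_num
  unfold pvBisect; norm_num
  unfold pvBisect; norm_num
  unfold pvBisect; norm_num
  split_ifs <;> first | omega | exact False.elim (by assumption)
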